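-- pv_equiv track=rewrite | github.com/hellstation/telegram-cleaner-bot | cleaner/cleaner.py | count_tracking_cookies
-- ===== SOURCE A (Python) =====
-- from typing import Dict, List, Optional, Set, Tuple
--
-- def count_tracking_cookies(lines: List[str]) -> int:
--     """
--     Count tracking cookies (Google Analytics, Facebook Pixel, etc.).
--
--     Args:
--         lines: List of cookie lines.
--
--     Returns:
--         Number of tracking cookies detected.
--     """
--     tracking_patterns = [
--         "_ga", "_gid", "_gat", "__utma", "__utmb", "__utmc", "__utmz",  # Google Analytics
--         "_fbp", "_fbc", "fr",  # Facebook
--         "_tt_enable_cookie", "_ttp",  # TikTok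
--         "mbox", "AMCV_", "s_cc", "s_sq", "s_vi",  # Adobe Analytics
--         "utag_main", "_utma", "_utmb", "_utmc", "_utmz",  # Tealium
--         "mp_", "__mp",  # Mixpanel
--         "amplitude_id",  # Amplitude
--         "ajs_user_id", "ajs_anonymous_id",  # Segment
--         "_hjid", "_hjClosedSurveyInvites",  # Hotjar
--         "intercom-id-", "intercom-session-",  # Intercom
--         "zendesk_",  # Zendesk
--         "drift_",  # Drift
--         "hsCtaTracking", "_hstc", "_hssc",  # HubSpot
--     ]
--
--     tracking_count = 0
--     for line in lines:
--         parts = line.strip().split("\t")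
--         if len(parts) >= 6:
--             cookie_name = parts[5].lower()
--             if any(pattern.lower() in cookie_name for pattern in tracking_patterns):
--                 tracking_count += 1
--
--     return tracking_count
-- ===== SOURCE B (Python) =====
-- from typing import List
--
-- _TRACKING_PATTERNS = [
--     "_ga", "_gid", "_gat", "__utma", "__utmb", "__utmc", "__utmz",
--     "_fbp", "_fbc", "fr",
--     "_tt_enable_cookie", "_ttp",
--     "mbox", "AMCV_", "s_cc", "s_sq", "s_vi",
--     "utag_main", "_utma", "_utmb", "_utmc", "_utmz",
--     "mp_", "__mp",
--     "amplitude_id",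
--     "ajs_user_id", "ajs_anonymous_id",
--     "_hjid", "_hjClosedSurveyInvites",
--     "intercom-id-", "intercom-session-",
--     "zendesk_",
--     "drift_",
--     "hsCtaTracking", "_hstc", "_hssc",
-- ]
--
--
-- def count_tracking_cookies(lines: List[str]) -> int:
--     # Hash-index approach: a set of lowered patterns and the set of their
--     # lengths; per cookie name, slide a window of each pattern length over
--     # the name and look the window up in the set, instead of scanning the
--     # pattern list with a substring search per pattern.
--     pats = {p.lower() for p in _TRACKING_PATTERNS}
--     lengths = {len(p) for p in pats}
--     n = 0
--     for line in lines:
--         parts = line.strip().split("\t")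
--         if len(parts) >= 6:
--             name = parts[5].lower()
--             if any(name[i:i + L] in pats
--                    for L in lengths
--                    for i in range(len(name) - L + 1)):
--                 n += 1
--     return n
-- ===== Notes on version B (the rewrite author's own statement) =====
-- stated objective: alternative
-- what changed: B builds a hash set of the lowered patterns plus the set of their lengths once, and per line replaces A's scan over the pattern list (substring search per pattern) with sliding a window of each pattern length over the cookie name and looking the window up in the set.
import Mathlib
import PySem

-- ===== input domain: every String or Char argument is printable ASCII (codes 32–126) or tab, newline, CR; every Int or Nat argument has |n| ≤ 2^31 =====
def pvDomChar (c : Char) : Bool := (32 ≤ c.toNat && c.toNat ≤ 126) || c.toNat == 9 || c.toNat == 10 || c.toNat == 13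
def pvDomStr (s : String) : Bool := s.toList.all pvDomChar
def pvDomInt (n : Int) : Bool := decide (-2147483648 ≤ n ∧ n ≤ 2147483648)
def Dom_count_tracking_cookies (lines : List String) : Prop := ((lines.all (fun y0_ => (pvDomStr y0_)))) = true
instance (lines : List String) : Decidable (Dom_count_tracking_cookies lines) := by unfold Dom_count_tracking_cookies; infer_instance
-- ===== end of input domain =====

-- B replaces A's per-line scan over the pattern list with sliding windows of the distinct
-- pattern lengths over the cookie name, looked up in a set of lowered patterns; same value.

-- ===== PORT A =====
def pvTrackingPatterns : List String := [
  "_ga", "_gid", "_gat", "__utma", "__utmb", "__utmc", "__utmz",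
  "_fbp", "_fbc", "fr",
  "_tt_enable_cookie", "_ttp",
  "mbox", "AMCV_", "s_cc", "s_sq", "s_vi",
  "utag_main", "_utma", "_utmb", "_utmc", "_utmz",
  "mp_", "__mp",
  "amplitude_id",
  "ajs_user_id", "ajs_anonymous_id",
  "_hjid", "_hjClosedSurveyInvites",
  "intercom-id-", "intercom-session-",
  "zendesk_",
  "drift_",
  "hsCtaTracking", "_hstc", "_hssc"]

def count_tracking_cookies (lines : List String) : Int :=
  lines.foldl (fun tracking_count line =>
    let parts := (PySem.Str.split? (PySem.Str.strip line) "\t").getD []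
    if parts.length ≥ 6 then
      let cookie_name := PySem.Str.lower ((PySem.List.pyGet? parts 5).getD "")
      if pvTrackingPatterns.any (fun pattern =>
          PySem.Str.isIn (PySem.Str.lower pattern) cookie_name) then
        tracking_count + 1
      else tracking_count
    else tracking_count) 0

-- ===== PORT B =====
-- pats = {p.lower() for p in _TRACKING_PATTERNS}
def pvPats : PySem.Set String := PySem.Set.ofList (pvTrackingPatterns.map PySem.Str.lower)
-- lengths = {len(p) for p in pats}
def pvLengths : PySem.Set Int := PySem.Set.ofList (pvPats.map (fun q => (PySem.Str.len q : Int)))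

-- any(name[i:i+L] in pats for L in lengths for i in range(len(name) - L + 1))
def pvHit (name : String) : Bool :=
  pvLengths.any (fun L =>
    (PySem.List.pyRange 0 ((PySem.Str.len name : Int) - L + 1) 1).any (fun i =>
      PySem.Set.contains pvPats (PySem.Str.slice name (some i) (some (i + L)))))

def count_tracking_cookies_alt (lines : List String) : Int :=
  lines.foldl (fun n line =>
    let parts := (PySem.Str.split? (PySem.Str.strip line) "\t").getD []
    if parts.length ≥ 6 then
      let name := PySem.Str.lower ((PySem.List.pyGet? parts 5).getD "")
      if pvHit name then n + 1 else n
    else n) 0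

-- ===== PRECONDITION & SPEC =====
def Spec_count_tracking_cookies (lines : List String) (out : Int) : Prop := out = count_tracking_cookies_alt lines
instance (lines : List String) (out : Int) : Decidable (Spec_count_tracking_cookies lines out) := by unfold Spec_count_tracking_cookies; infer_instance

-- ===== CLAIM =====
def Claim_equal_count_tracking_cookies : Prop := ∀ (lines : List String), Dom_count_tracking_cookies lines → Spec_count_tracking_cookies lines (count_tracking_cookies lines)

-- ===== LEMMAS AND PROOFS =====

-- membership in the set of lowered patterns
lemma pv_mem_pats (q : String) :
    q ∈ pvPats ↔ ∃ p ∈ pvTrackingPatterns, q = PySem.Str.lower p := by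
  unfold pvPats
  rw [PySem.Set.mem_ofList, List.mem_map]
  constructor
  · rintro ⟨p, hp, rfl⟩; exact ⟨p, hp, rfl⟩
  · rintro ⟨p, hp, rfl⟩; exact ⟨p, hp, rfl⟩

-- per cookie name, A's any-substring test equals B's window scan
lemma pv_cond_eq (name : String) :
    pvTrackingPatterns.any (fun pattern =>
      PySem.Str.isIn (PySem.Str.lower pattern) name) = pvHit name := by
  rw [Bool.eq_iff_iff]
  unfold pvHit
  simp only [List.any_eq_true]
  constructor
  · rintro ⟨p, hp, hin⟩
    rw [PySem.Str.isIn_iff_infix] at hin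
    set q := PySem.Str.lower p with hq
    have hqmem : q ∈ pvPats := (pv_mem_pats q).mpr ⟨p, hp, rfl⟩
    obtain ⟨s, t, hst⟩ := hin
    refine ⟨(PySem.Str.len q : Int), ?_, (s.length : Int), ?_, ?_⟩
    · unfold pvLengths
      rw [PySem.Set.mem_ofList, List.mem_map]
      exact ⟨q, hqmem, rfl⟩
    · rw [PySem.List.mem_pyRange_one]
      have hlen := congrArg List.length hst
      simp only [List.length_append] at hlen
      constructor
      · exact_mod_cast Int.natCast_nonneg _
      · simp only [PySem.Str.len_eq]
        omega
    · have hslice : PySem.Str.slice name (some (s.length : Int))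
          (some ((s.length : Int) + (PySem.Str.len q : Int))) = q := by
        have : (PySem.Str.slice name (some (s.length : Int))
            (some ((s.length : Int) + (PySem.Str.len q : Int)))).toList = q.toList := by
          simp only [PySem.Str.toList_slice, PySem.Chars.slice_eq_listSlice,
            PySem.Str.len_eq]
          rw [PySem.List.slice_natCast_add, ← hst, List.append_assoc,
            List.drop_left, List.take_left]
        exact String.toList_inj.mp this
      rw [hslice]
      simpa [PySem.Set.contains] using hqmem
  · rintro ⟨L, hL, i, hi, hcontains⟩
    have hqmem : PySem.Str.slice name (some i) (some (i + L)) ∈ pvPats := by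
      simpa [PySem.Set.contains] using hcontains
    obtain ⟨p, hp, hq⟩ := (pv_mem_pats _).mp hqmem
    refine ⟨p, hp, ?_⟩
    rw [PySem.Str.isIn_iff_infix, ← hq]
    rw [PySem.List.mem_pyRange_one] at hi
    have h0i : 0 ≤ i := hi.1
    have h0L : 0 ≤ L := by
      unfold pvLengths at hL
      rw [PySem.Set.mem_ofList, List.mem_map] at hL
      obtain ⟨q', _, rfl⟩ := hL
      exact Int.natCast_nonneg _
    have : (PySem.Str.slice name (some i) (some (i + L))).toList
        = (name.toList.drop i.toNat).take ((i + L).toNat - i.toNat) := by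
      simp only [PySem.Str.toList_slice, PySem.Chars.slice_eq_listSlice]
      rw [PySem.List.slice_toNat _ h0i (by omega)]
    rw [this]
    exact ((name.toList.drop i.toNat).take_prefix _).isInfix.trans
      (name.toList.drop_suffix i.toNat).isInfix

-- A's per-line body is B's per-line body
lemma pv_body_eq :
    (fun (tracking_count : Int) (line : String) =>
      let parts := (PySem.Str.split? (PySem.Str.strip line) "\t").getD []
      if parts.length ≥ 6 then
        let cookie_name := PySem.Str.lower ((PySem.List.pyGet? parts 5).getD "")
        if pvTrackingPatterns.any (fun pattern =>
            PySem.Str.isIn (PySem.Str.lower pattern) cookie_name) then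
          tracking_count + 1
        else tracking_count
      else tracking_count)
    = (fun (n : Int) (line : String) =>
      let parts := (PySem.Str.split? (PySem.Str.strip line) "\t").getD []
      if parts.length ≥ 6 then
        let name := PySem.Str.lower ((PySem.List.pyGet? parts 5).getD "")
        if pvHit name then n + 1 else n
      else n) := by
  funext n line
  dsimp only
  rw [pv_cond_eq]

-- ===== VERDICT =====
theorem count_tracking_cookies_spec : Claim_equal_count_tracking_cookies := by
  intro lines _
  unfold Spec_count_tracking_cookies count_tracking_cookies count_tracking_cookies_alt
  rw [pv_body_eq]
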